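-- pv_equiv track=rewrite | github.com/japinol7/small-python-projects | projects/cyber_dojo/task_100_doors/take_00_without_tdd/doors_100_sol1.py | get_final_open_doors
-- ===== SOURCE A (Python) =====
-- def get_final_open_doors(num_doors):
--     # Add 1 more door because we will ignore door number 0
--     num_doors += 1
--
--     doors = [False for _ in range(num_doors)]
--     counter = 1
--     while counter <= num_doors:
--         for i in range(counter, num_doors, counter):
--             doors[i] = not doors[i]
--         counter += 1
--     return [(door, 'open' if state else 'closed')
--             for door, state in enumerate(doors) if door > 0]
-- ===== SOURCE B (Python) =====
-- def get_final_open_doors(num_doors):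
--     # Door i ends open iff i is a perfect square: single pass tracking the next square.
--     result = []
--     k = 1
--     for door in range(1, num_doors + 1):
--         if door == k * k:
--             result.append((door, 'open'))
--             k += 1
--         else:
--             result.append((door, 'closed'))
--     return result
-- ===== Notes on version B (the rewrite author's own statement) =====
-- stated objective: faster
-- what changed: A builds a boolean array and toggles door i once per divisor (a sieve of nested range loops); B makes one pass over doors 1..n, emitting 'open' exactly when the door number equals the next perfect square, tracked by a single counter.
import Mathlib
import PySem

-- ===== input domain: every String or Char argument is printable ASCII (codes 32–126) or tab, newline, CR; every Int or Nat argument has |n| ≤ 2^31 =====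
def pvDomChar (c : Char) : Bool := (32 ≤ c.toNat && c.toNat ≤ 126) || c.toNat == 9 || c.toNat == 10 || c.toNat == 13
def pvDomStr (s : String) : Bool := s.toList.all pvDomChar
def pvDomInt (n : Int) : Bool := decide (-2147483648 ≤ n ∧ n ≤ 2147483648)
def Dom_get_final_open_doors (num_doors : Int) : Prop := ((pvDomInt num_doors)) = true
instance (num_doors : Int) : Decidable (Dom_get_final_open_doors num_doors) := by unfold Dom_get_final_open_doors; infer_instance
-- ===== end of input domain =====

-- B replaces A's O(n log n) toggle sieve by a single pass that marks exactly the perfect-square doors open.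


-- ===== PORT A =====
def get_final_open_doors (num_doors : Int) : List (Int × String) :=
  -- num_doors += 1
  let nd := num_doors + 1
  -- doors = [False for _ in range(num_doors)]
  let doors : List Bool := (PySem.List.pyRange 0 nd 1).map (fun _ => false)
  -- while counter <= num_doors: for i in range(counter, num_doors, counter): doors[i] = not doors[i]
  let doors := (PySem.List.pyRange 1 (nd + 1) 1).foldl
    (fun doors counter =>
      (PySem.List.pyRange counter nd counter).foldl
        (fun doors i => doors.set i.toNat (!(PySem.List.pyGetD doors i false))) doors)
    doors
  -- [(door, 'open' if state else 'closed') for door, state in enumerate(doors) if door > 0]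
  (PySem.List.enumerate doors).filterMap
    (fun p => if p.1 > 0 then some (p.1, if p.2 then "open" else "closed") else none)

-- ===== PORT B =====
def get_final_open_doors_alt (num_doors : Int) : List (Int × String) :=
  let s := (PySem.List.pyRange 1 (num_doors + 1) 1).foldl
    (fun (s : List (Int × String) × Int) door =>
      if door == s.2 * s.2 then (s.1 ++ [(door, "open")], s.2 + 1)
      else (s.1 ++ [(door, "closed")], s.2))
    ([], 1)
  s.1

-- ===== PRECONDITION & SPEC =====
def Spec_get_final_open_doors (num_doors : Int) (out : List (Int × String)) : Prop := out = get_final_open_doors_alt num_doors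
instance (num_doors : Int) (out : List (Int × String)) : Decidable (Spec_get_final_open_doors num_doors out) := by unfold Spec_get_final_open_doors; infer_instance

-- ===== CLAIM (what is proved, stated in full; the proofs are below) =====
def Claim_equal_get_final_open_doors : Prop := ∀ (num_doors : Int), Dom_get_final_open_doors num_doors → Spec_get_final_open_doors num_doors (get_final_open_doors num_doors)

-- ===== LEMMAS AND PROOFS =====

-- Common normal form: door k+1 is open iff k+1 is a perfect square.
def pvSpec (n : Int) : List (Int × String) :=
  (List.range n.toNat).map
    (fun (k : ℕ) => ((1 + (k : Int)), if Nat.sqrt (k+1) * Nat.sqrt (k+1) = k+1 then "open" else "closed"))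

-- τ(J) is odd iff J is a perfect square (pairing d ↔ J / d).
lemma pv_tau_odd_iff (J : ℕ) (hJ : 0 < J) :
    Odd J.divisors.card ↔ ∃ t, t * t = J := by
  have hsplit1 := Finset.card_filter_add_card_filter_not
    (s := J.divisors) (p := fun d => d * d < J)
  have hsplit2 := Finset.card_filter_add_card_filter_not
    (s := J.divisors.filter (fun d => ¬ d * d < J)) (p := fun d => d * d = J)
  have hBeq : ((J.divisors.filter (fun d => ¬ d * d < J)).filter (fun d => ¬ d * d = J))
      = J.divisors.filter (fun d => J < d * d) := by
    rw [Finset.filter_filter]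
    apply Finset.filter_congr
    intro d _
    omega
  have hCeq : ((J.divisors.filter (fun d => ¬ d * d < J)).filter (fun d => d * d = J))
      = J.divisors.filter (fun d => d * d = J) := by
    rw [Finset.filter_filter]
    apply Finset.filter_congr
    intro d _
    omega
  rw [hBeq, hCeq] at hsplit2
  have hAB : (J.divisors.filter (fun d => d * d < J)).card
      = (J.divisors.filter (fun d => J < d * d)).card := by
    apply Finset.card_nbij' (i := fun d => J / d) (j := fun e => J / e)
    · intro d hd
      simp only [Finset.coe_filter, Set.mem_setOf_eq, Nat.mem_divisors] at hd ⊢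
      obtain ⟨⟨hdvd, -⟩, hlt⟩ := hd
      have hd0 : 0 < d := Nat.pos_of_dvd_of_pos hdvd hJ
      have he : d * (J / d) = J := Nat.mul_div_cancel' hdvd
      have hde : d < J / d := by nlinarith
      refine ⟨⟨Nat.div_dvd_of_dvd hdvd, hJ.ne'⟩, by nlinarith⟩
    · intro e he'
      simp only [Finset.coe_filter, Set.mem_setOf_eq, Nat.mem_divisors] at he' ⊢
      obtain ⟨⟨hdvd, -⟩, hlt⟩ := he'
      have he0 : 0 < e := Nat.pos_of_dvd_of_pos hdvd hJ
      have he : e * (J / e) = J := Nat.mul_div_cancel' hdvd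
      have hd0 : 0 < J / e := by
        rcases Nat.eq_zero_or_pos (J / e) with h0 | h0
        · rw [h0, Nat.mul_zero] at he; omega
        · exact h0
      have hde : J / e < e := by nlinarith
      refine ⟨⟨Nat.div_dvd_of_dvd hdvd, hJ.ne'⟩, by nlinarith⟩
    · intro d hd
      simp only [Finset.coe_filter, Set.mem_setOf_eq, Nat.mem_divisors] at hd
      exact Nat.div_div_self hd.1.1 hJ.ne'
    · intro e he'
      simp only [Finset.coe_filter, Set.mem_setOf_eq, Nat.mem_divisors] at he'
      exact Nat.div_div_self he'.1.1 hJ.ne' 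
  have hCle : (J.divisors.filter (fun d => d * d = J)).card ≤ 1 := by
    apply Finset.card_le_one.mpr
    intro a ha b hb
    simp only [Finset.mem_filter] at ha hb
    exact Nat.mul_self_inj.mp (ha.2.trans hb.2.symm)
  have hCpos : (0 < (J.divisors.filter (fun d => d * d = J)).card) ↔ ∃ t, t * t = J := by
    rw [Finset.card_pos]
    constructor
    · rintro ⟨d, hd⟩
      simp only [Finset.mem_filter] at hd
      exact ⟨d, hd.2⟩
    · rintro ⟨t, ht⟩
      refine ⟨t, ?_⟩
      simp only [Finset.mem_filter, Nat.mem_divisors]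
      exact ⟨⟨⟨t, ht.symm⟩, hJ.ne'⟩, ht⟩
  rw [Nat.odd_iff]
  rw [← hCpos]
  omega

-- the inner toggle fold preserves length
lemma pv_tog_len (L : List Int) (ds : List Bool) :
    (L.foldl (fun ds i => ds.set i.toNat (!(PySem.List.pyGetD ds i false))) ds).length
      = ds.length := by
  induction L generalizing ds with
  | nil => rfl
  | cons i L ih => simp only [List.foldl_cons]; rw [ih]; simp

-- per-index effect of the inner toggle fold
lemma pv_tog_getD (L : List Int) (ds : List Bool) (j : Nat)
    (hL : ∀ i ∈ L, 0 ≤ i ∧ i.toNat < ds.length)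
    (hnd : (L.map Int.toNat).Nodup) :
    (L.foldl (fun ds i => ds.set i.toNat (!(PySem.List.pyGetD ds i false))) ds).getD j false
      = if (j : Int) ∈ L then !(ds.getD j false) else ds.getD j false := by
  induction L generalizing ds with
  | nil => simp
  | cons i L ih =>
    obtain ⟨hi0, hilen⟩ := hL i (by simp)
    simp only [List.foldl_cons]
    have hnd0 : i.toNat ∉ L.map Int.toNat := (List.nodup_cons.mp (by simpa using hnd)).1
    have hnd' : (L.map Int.toNat).Nodup := (List.nodup_cons.mp (by simpa using hnd)).2
    have hL' : ∀ x ∈ L, 0 ≤ x ∧ x.toNat < (ds.set i.toNat (!(PySem.List.pyGetD ds i false))).length := by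
      intro x hx
      have := hL x (by simp [hx])
      simpa [List.length_set] using this
    rw [ih _ hL' hnd']
    have hval : PySem.List.pyGetD ds i false = ds.getD i.toNat false :=
      PySem.List.pyGetD_of_nonneg ds false hi0
    have hsetD : ∀ (j' : Nat), (ds.set i.toNat (!(PySem.List.pyGetD ds i false))).getD j' false
        = if i.toNat = j' then !(ds.getD i.toNat false) else ds.getD j' false := by
      intro j'
      rw [List.getD_eq_getElem?_getD, List.getElem?_set]
      by_cases hij : i.toNat = j'
      · subst hij
        simp [hilen, hval, List.getD_eq_getElem?_getD]
      · simp [hij, List.getD_eq_getElem?_getD]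
    by_cases hji : (j : Int) = i
    · have hjN : i.toNat = j := by omega
      have hjnotL : (j : Int) ∉ L := by
        intro hmem
        exact hnd0 (List.mem_map.mpr ⟨(j : Int), hmem, by omega⟩)
      rw [if_neg hjnotL, hsetD j, if_pos hjN, hjN]
      simp [hji]
    · have : ¬ (i.toNat = j) := by omega
      rw [hsetD j, if_neg this]
      by_cases hjl : (j : Int) ∈ L <;> simp [hjl, hji]

lemma pv_nodup_pyRange_pos (a b : Int) {s : Int} (hs : 0 < s) :
    (PySem.List.pyRange a b s).Nodup := by
  rw [PySem.List.pyRange_of_pos a b hs]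
  refine List.Nodup.map_on ?_ (List.nodup_range)
  intro x _ y _ hxy
  have hx : (s : Int) * x = s * y := by omega
  have := mul_left_cancel₀ (ne_of_gt hs) hx
  exact_mod_cast this

-- per-index effect of the whole double loop: parity of the toggle count
lemma pv_outer_getD (C : List Int) (nd : Int) (ds : List Bool) (j : Nat)
    (hC : ∀ c ∈ C, 1 ≤ c) (hlen : nd ≤ (ds.length : Int)) :
    (C.foldl
        (fun doors counter =>
          (PySem.List.pyRange counter nd counter).foldl
            (fun doors i => doors.set i.toNat (!(PySem.List.pyGetD doors i false))) doors)
        ds).getD j false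
      = if Odd (C.countP (fun c => decide ((j : Int) ∈ PySem.List.pyRange c nd c)))
        then !(ds.getD j false) else ds.getD j false := by
  induction C generalizing ds with
  | nil => simp
  | cons c C ih =>
    have hc1 : 1 ≤ c := hC c (by simp)
    simp only [List.foldl_cons, List.countP_cons]
    have hlen1 : ((PySem.List.pyRange c nd c).foldl
        (fun doors i => doors.set i.toNat (!(PySem.List.pyGetD doors i false))) ds).length
        = ds.length := pv_tog_len _ _
    rw [ih _ (fun x hx => hC x (by simp [hx])) (by rw [hlen1]; exact hlen)]
    have hmem : ∀ i ∈ PySem.List.pyRange c nd c, 0 ≤ i ∧ i.toNat < ds.length := by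
      intro i hi
      have h := (PySem.List.mem_pyRange_iff_of_pos (by omega) i).mp hi
      omega
    have hnd2 : ((PySem.List.pyRange c nd c).map Int.toNat).Nodup := by
      refine List.Nodup.map_on ?_ (pv_nodup_pyRange_pos c nd (by omega))
      intro x hx y hy hxy
      have hx0 := (hmem x hx).1
      have hy0 := (hmem y hy).1
      omega
    rw [pv_tog_getD _ _ _ hmem hnd2]
    by_cases hj : (j : Int) ∈ PySem.List.pyRange c nd c
    · simp only [hj, decide_true, if_pos]
      by_cases ho : Odd (C.countP (fun c => decide ((j : Int) ∈ PySem.List.pyRange c nd c)))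
      · simp [ho, Nat.odd_add_one]
      · simp [ho, Nat.odd_add_one]
    · simp only [hj, decide_false]
      simp

lemma pv_range_filter_card (J : ℕ) (hJ : 0 < J) :
    ((Finset.range J).filter (fun k => (k+1) ∣ J)).card = J.divisors.card := by
  apply Finset.card_nbij' (i := fun k => k + 1) (j := fun d => d - 1)
  · intro k hk
    simp only [Finset.coe_filter, Set.mem_setOf_eq, Finset.mem_range] at hk
    simp only [Finset.mem_coe, Nat.mem_divisors]
    exact ⟨hk.2, hJ.ne'⟩
  · intro d hd
    simp only [Finset.mem_coe, Nat.mem_divisors] at hd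
    have h1 : 0 < d := Nat.pos_of_dvd_of_pos hd.1 hJ
    have h2 : d ≤ J := Nat.le_of_dvd hJ hd.1
    simp only [Finset.coe_filter, Set.mem_setOf_eq, Finset.mem_range]
    constructor
    · omega
    · rw [Nat.sub_add_cancel h1]; exact hd.1
  · intro k _; simp
  · intro d hd
    simp only [Finset.mem_coe, Nat.mem_divisors] at hd
    have h1 : 0 < d := Nat.pos_of_dvd_of_pos hd.1 hJ
    show d - 1 + 1 = d
    omega

-- the toggle count of door j is the number of divisors of j
lemma pv_count_divisors (n : Int) (j : Nat) (hj : 0 < j) (hjn : (j : Int) ≤ n) :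
    (PySem.List.pyRange 1 (n + 1 + 1) 1).countP
        (fun c => decide ((j : Int) ∈ PySem.List.pyRange c (n + 1) c))
      = j.divisors.card := by
  rw [PySem.List.pyRange_one_append 1 ((j : Int) + 1) (n + 1 + 1) (by omega) (by omega),
    List.countP_append]
  have h2 : (PySem.List.pyRange ((j : Int) + 1) (n + 1 + 1)).countP
      (fun c => decide ((j : Int) ∈ PySem.List.pyRange c (n + 1) c)) = 0 := by
    rw [List.countP_eq_zero]
    intro c hc
    have hcge := (PySem.List.mem_pyRange_one.mp hc).1
    simp only [decide_eq_true_eq]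
    intro hmem
    have := (PySem.List.mem_pyRange_iff_of_pos (show (0 : Int) < c by omega) _).mp hmem
    omega
  rw [h2, Nat.add_zero]
  rw [List.countP_congr (q := fun c => decide (c ∣ (j : Int))) ?_]
  · rw [PySem.List.pyRange_one 1 ((j : Int) + 1), List.countP_map]
    have hjt : ((j : Int) + 1 - 1).toNat = j := by omega
    rw [hjt]
    rw [List.countP_congr (q := fun k => decide ((k + 1) ∣ j)) ?_]
    · rw [List.countP_eq_length_filter,
        ← List.toFinset_card_of_nodup (List.Nodup.filter _ List.nodup_range),
        List.toFinset_filter, List.toFinset_range]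
      have hset : Finset.filter (fun x => decide ((x + 1) ∣ j) = true) (Finset.range j)
          = Finset.filter (fun k => (k + 1) ∣ j) (Finset.range j) := by
        apply Finset.filter_congr
        intro x _
        simp
      rw [hset]
      exact pv_range_filter_card j hj
    · intro k _
      have hcast : (1 + (k : Int)) = ((k + 1 : ℕ) : Int) := by push_cast; ring
      simp only [Function.comp_apply, hcast, Int.natCast_dvd_natCast]
  · intro c hc
    have h := PySem.List.mem_pyRange_one.mp hc
    simp only [decide_eq_true_eq]
    rw [PySem.List.mem_pyRange_iff_of_pos (show (0 : Int) < c by omega)]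
    constructor
    · rintro ⟨-, -, hd⟩
      have := dvd_add hd (dvd_refl c)
      simpa using this
    · intro hd
      exact ⟨by omega, by omega, dvd_sub hd (dvd_refl c)⟩

lemma pv_outer_len (C : List Int) (nd : Int) (ds : List Bool) :
    (C.foldl (fun doors counter => (PySem.List.pyRange counter nd counter).foldl
        (fun doors i => doors.set i.toNat (!(PySem.List.pyGetD doors i false))) doors) ds).length
      = ds.length := by
  induction C generalizing ds with
  | nil => rfl
  | cons c C ih => simp only [List.foldl_cons]; rw [ih, pv_tog_len]

lemma pv_filterMap_eq_map {α β : Type} (l : List α) (f : α → Option β) (g : α → β)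
    (h : ∀ x ∈ l, f x = some (g x)) : l.filterMap f = l.map g := by
  induction l with
  | nil => rfl
  | cons a l ih =>
    rw [List.filterMap_cons, h a (by simp), List.map_cons, ih (fun x hx => h x (by simp [hx]))]

-- A computes pvSpec
lemma pv_A_eq (n : Int) : get_final_open_doors n = pvSpec n := by
  simp only [get_final_open_doors]
  by_cases hneg : n < 0
  · have h1 : PySem.List.pyRange 0 (n + 1) = [] := PySem.List.pyRange_one_eq_nil (by omega)
    have h2 : PySem.List.pyRange 1 (n + 1 + 1) = [] := PySem.List.pyRange_one_eq_nil (by omega)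
    have h3 : n.toNat = 0 := by omega
    simp [h1, h2, h3, pvSpec, PySem.List.enumerate_nil]
  · replace hneg : 0 ≤ n := by omega
    set doors := (PySem.List.pyRange 1 (n + 1 + 1)).foldl
      (fun doors counter => (PySem.List.pyRange counter (n + 1) counter).foldl
        (fun doors i => doors.set i.toNat (!(PySem.List.pyGetD doors i false))) doors)
      ((PySem.List.pyRange 0 (n + 1)).map (fun _ => false)) with hdoors
    have hlen0 : (((PySem.List.pyRange 0 (n + 1)).map (fun _ => false)) : List Bool).length
        = (n + 1).toNat := by
      simp [PySem.List.length_pyRange_one]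
    have hd0 : ∀ j : Nat,
        ((PySem.List.pyRange 0 (n + 1)).map (fun _ => false) : List Bool).getD j false = false := by
      intro j
      rw [List.getD_eq_getElem?_getD]
      rcases Nat.lt_or_ge j ((PySem.List.pyRange 0 (n + 1)).map (fun _ => false)).length with h | h
      · rw [List.getElem?_eq_getElem h]; simp
      · rw [List.getElem?_eq_none (by omega)]; rfl
    have hfinal : ∀ j : Nat, 0 < j → (j : Int) ≤ n →
        doors.getD j false = decide (Nat.sqrt j * Nat.sqrt j = j) := by
      intro j hj hjn
      rw [hdoors, pv_outer_getD _ _ _ _ (fun c hc => (PySem.List.mem_pyRange_one.mp hc).1)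
        (by rw [hlen0]; omega)]
      rw [pv_count_divisors n j hj hjn, hd0]
      have hiff := (pv_tau_odd_iff j hj).trans (Nat.exists_mul_self j)
      by_cases hsq : Nat.sqrt j * Nat.sqrt j = j
      · simp [hsq, hiff.mpr hsq]
      · have hno : ¬ Odd j.divisors.card := fun ho => hsq (hiff.mp ho)
        simp [hsq, hno]
    have hlenf : doors.length = (n + 1).toNat := by
      rw [hdoors, pv_outer_len]; exact hlen0
    have hlen_int : PySem.List.len doors = n + 1 := by
      rw [PySem.List.len_eq, hlenf]; omega
    rw [PySem.List.enumerate_eq_map_pyRange doors false, List.filterMap_map, hlen_int]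
    rw [PySem.List.pyRange_one_cons (show (0 : Int) < n + 1 by omega)]
    rw [List.filterMap_cons]
    have hhead : ((fun p => if p.1 > 0 then
          some ((p.1 : Int), if p.2 then "open" else "closed") else none) ∘
        (fun j => (j, PySem.List.pyGetD doors j false))) (0 : Int) = none := by
      simp
    rw [hhead]
    rw [pv_filterMap_eq_map _ _
      (fun i => ((i : Int), if Nat.sqrt i.toNat * Nat.sqrt i.toNat = i.toNat
        then "open" else "closed")) ?_]
    · rw [show (0 : Int) + 1 = 1 from rfl, PySem.List.pyRange_one 1 (n + 1), List.map_map]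
      unfold pvSpec
      have ht : (n + 1 - 1).toNat = n.toNat := by omega
      rw [ht]
      apply List.map_congr_left
      intro k _
      simp only [Function.comp_apply]
      have h1 : ((1 : Int) + (k : Int)).toNat = k + 1 := by omega
      rw [h1]
    · intro x hx
      have hmem := PySem.List.mem_pyRange_one.mp hx
      have hx1 : (1 : Int) ≤ x := by omega
      have hfx := hfinal x.toNat (by omega) (by omega)
      simp only [Function.comp_apply]
      rw [if_pos (by omega)]
      rw [PySem.List.pyGetD_of_nonneg doors false (by omega)]
      rw [hfx]
      by_cases hsq : Nat.sqrt x.toNat * Nat.sqrt x.toNat = x.toNat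
      · simp [hsq]
      · simp [hsq]

-- sqrt step lemmas for B's counter invariant
lemma pv_sqrt_succ_eq (t : ℕ) (h : t + 1 = (Nat.sqrt t + 1) * (Nat.sqrt t + 1)) :
    Nat.sqrt (t+1) = Nat.sqrt t + 1 := by
  rw [h, ← pow_two]
  exact Nat.sqrt_eq' _

lemma pv_sqrt_succ_ne (t : ℕ) (h : ¬ t + 1 = (Nat.sqrt t + 1) * (Nat.sqrt t + 1)) :
    Nat.sqrt (t+1) = Nat.sqrt t := by
  have h1 : t < (Nat.sqrt t + 1) ^ 2 := Nat.lt_succ_sqrt' t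
  have h2 : t + 1 < (Nat.sqrt t + 1) ^ 2 := by
    rcases Nat.lt_or_ge (t + 1) ((Nat.sqrt t + 1) ^ 2) with h' | h'
    · exact h'
    · exfalso; exact h (by rw [pow_two] at h1 h'; omega)
  have h3 : Nat.sqrt (t + 1) < Nat.sqrt t + 1 := Nat.sqrt_lt'.mpr h2
  have h4 : Nat.sqrt t ≤ Nat.sqrt (t + 1) := Nat.sqrt_le_sqrt (by omega)
  omega

-- B's loop invariant
lemma pv_B_inv (t : ℕ) :
    ((List.range t).map (fun (k : ℕ) => (1 + (k : Int)))).foldl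
      (fun (s : List (Int × String) × Int) door =>
        if door == s.2 * s.2 then (s.1 ++ [(door, "open")], s.2 + 1)
        else (s.1 ++ [(door, "closed")], s.2))
      ([], 1)
    = ((List.range t).map
        (fun (k : ℕ) => ((1 + (k : Int)), if Nat.sqrt (k+1) * Nat.sqrt (k+1) = k+1 then "open" else "closed")),
       (Nat.sqrt t : Int) + 1) := by
  induction t with
  | zero => simp
  | succ t ih =>
    rw [List.range_succ, List.map_append, List.map_append, List.foldl_append, ih]
    simp only [List.map_cons, List.map_nil, List.foldl_cons, List.foldl_nil]
    by_cases h : t + 1 = (Nat.sqrt t + 1) * (Nat.sqrt t + 1)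
    · have hc : (1 + (t : Int)) = ((Nat.sqrt t : Int) + 1) * ((Nat.sqrt t : Int) + 1) := by
        zify at h; linarith [h]
      have hs := pv_sqrt_succ_eq t h
      simp [hc, hs, h.symm]
    · have hc : ¬ (1 + (t : Int)) = ((Nat.sqrt t : Int) + 1) * ((Nat.sqrt t : Int) + 1) := by
        intro hcon
        have hcon' : ((t : Int) + 1) = ((Nat.sqrt t : Int) + 1) * ((Nat.sqrt t : Int) + 1) := by
          linarith [hcon]
        exact h (by exact_mod_cast hcon')
      have hs := pv_sqrt_succ_ne t h
      have hw : ¬ (Nat.sqrt t * Nat.sqrt t = t + 1) := by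
        have := Nat.sqrt_le t; omega
      simp [hc, hs, hw]

-- B computes pvSpec
lemma pv_B_eq (n : Int) : get_final_open_doors_alt n = pvSpec n := by
  simp only [get_final_open_doors_alt]
  rw [PySem.List.pyRange_one]
  have h1 : (n + 1 - 1).toNat = n.toNat := by omega
  rw [h1, pv_B_inv n.toNat]
  rfl

-- ===== VERDICT (by name: the statement is the Claim_ definition above) =====
theorem get_final_open_doors_spec : Claim_equal_get_final_open_doors := by
  intro n _
  unfold Spec_get_final_open_doors
  rw [pv_A_eq, pv_B_eq]
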